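-- pv_equiv track=rewrite | github.com/Molgi/Trial_guy | Trevor (1).py | compute_migration_cost
-- ===== SOURCE A (Python) =====
-- number_channels = 10
--
-- def compute_migration_cost(prev_sec_user_placement_dict,new_sec_user_placement_dict,numb_sec_users,cost_mig_matrix):
--     # Compute the number of handoff based on previous and current associations
--     total_mig_cost=0
--     for user_ID in range(numb_sec_users):# find where the user is currently placed and where he was before
--         previous_channel=None # channel wehre user was previosly served
--         Current_Channel=None # where user is currently served
--         for channel_ID in range(number_channels):
--             if channel_ID in prev_sec_user_placement_dict:
--                 prev_mapped_user_list=prev_sec_user_placement_dict[channel_ID]# users previous mapped in the channel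
--                 if user_ID in prev_mapped_user_list:
--                     previous_channel=channel_ID
--             if channel_ID in new_sec_user_placement_dict:
--                 cur_mapped_user_list=new_sec_user_placement_dict[channel_ID]# users current mapped in this channel
--                 if user_ID in cur_mapped_user_list:
--                     Current_Channel=channel_ID
--         if previous_channel==None or Current_Channel==None:
--             pass
--         else:
--             mig_cost=cost_mig_matrix[previous_channel][Current_Channel]
--             total_mig_cost+=mig_cost
--
--
--     return total_mig_cost
-- ===== SOURCE B (Python) =====
-- number_channels = 10
--
-- def _channel_of(placement_dict):
--     # last (i.e. highest, since we scan ascending) channel in 0..9 holding each user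
--     chan_of = {}
--     for channel_ID in range(number_channels):
--         if channel_ID in placement_dict:
--             for u in placement_dict[channel_ID]:
--                 chan_of[u] = channel_ID
--     return chan_of
--
-- def compute_migration_cost(prev_sec_user_placement_dict, new_sec_user_placement_dict, numb_sec_users, cost_mig_matrix):
--     prev_of = _channel_of(prev_sec_user_placement_dict)
--     cur_of = _channel_of(new_sec_user_placement_dict)
--     total_mig_cost = 0
--     for user_ID in range(numb_sec_users):
--         if user_ID in prev_of and user_ID in cur_of:
--             total_mig_cost += cost_mig_matrix[prev_of[user_ID]][cur_of[user_ID]]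
--     return total_mig_cost
-- ===== Notes on version B (the rewrite author's own statement) =====
-- stated objective: alternative
-- what changed: B builds two user->channel index dictionaries in a single pass over the channels and their user lists, then sums per user with O(1) dictionary lookups, instead of A's per-user rescan of every channel with list-membership tests (intended as faster; a timing run measured 1.3-2.2x but below the 1.5x bar at the largest size).
import Mathlib
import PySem

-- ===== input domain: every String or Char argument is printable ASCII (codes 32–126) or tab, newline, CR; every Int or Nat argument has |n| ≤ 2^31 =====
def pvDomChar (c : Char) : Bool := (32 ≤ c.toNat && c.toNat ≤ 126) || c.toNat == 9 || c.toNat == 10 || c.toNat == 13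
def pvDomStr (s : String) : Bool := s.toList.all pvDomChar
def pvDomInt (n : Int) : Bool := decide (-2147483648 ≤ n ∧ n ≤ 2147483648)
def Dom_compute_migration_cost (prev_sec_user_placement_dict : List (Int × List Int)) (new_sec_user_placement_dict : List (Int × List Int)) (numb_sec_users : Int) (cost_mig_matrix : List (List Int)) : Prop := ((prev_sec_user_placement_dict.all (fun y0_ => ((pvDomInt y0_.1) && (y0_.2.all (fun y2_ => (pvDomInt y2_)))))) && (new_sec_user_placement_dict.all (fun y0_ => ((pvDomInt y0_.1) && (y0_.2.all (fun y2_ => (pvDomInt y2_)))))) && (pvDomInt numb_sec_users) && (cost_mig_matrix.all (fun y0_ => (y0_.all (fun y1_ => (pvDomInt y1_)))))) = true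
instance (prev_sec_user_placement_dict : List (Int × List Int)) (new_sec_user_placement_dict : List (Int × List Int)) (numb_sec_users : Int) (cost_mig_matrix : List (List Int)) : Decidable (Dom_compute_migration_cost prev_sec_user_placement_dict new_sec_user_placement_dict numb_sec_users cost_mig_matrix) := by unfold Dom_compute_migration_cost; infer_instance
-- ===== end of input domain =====

-- B replaces A's per-user rescan of all channels by two user→channel index dicts built once, then an O(1)-lookup sum per user (return value only; no argument is mutated).

-- ===== PORT A =====
-- literal transliteration of A: outer loop over users, inner loop over the 10 channels
-- carrying (previous_channel, Current_Channel); matrix indexing via pyGetD (exact under Pre_).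
def compute_migration_cost (prev_sec_user_placement_dict : List (Int × List Int)) (new_sec_user_placement_dict : List (Int × List Int)) (numb_sec_users : Int) (cost_mig_matrix : List (List Int)) : Int :=
  (PySem.List.pyRange 0 numb_sec_users 1).foldl (fun total_mig_cost user_ID =>
    let pc : Option Int × Option Int :=
      (PySem.List.pyRange 0 10 1).foldl (fun (pc : Option Int × Option Int) channel_ID =>
        let pc1 :=
          match (PySem.Dict.mk prev_sec_user_placement_dict).get? channel_ID with
          | some prev_mapped_user_list =>
              if user_ID ∈ prev_mapped_user_list then (some channel_ID, pc.2) else pc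
          | none => pc
        match (PySem.Dict.mk new_sec_user_placement_dict).get? channel_ID with
        | some cur_mapped_user_list =>
            if user_ID ∈ cur_mapped_user_list then (pc1.1, some channel_ID) else pc1
        | none => pc1) (none, none)
    match pc.1, pc.2 with
    | some previous_channel, some current_channel =>
        total_mig_cost + PySem.List.pyGetD (PySem.List.pyGetD cost_mig_matrix previous_channel []) current_channel 0
    | _, _ => total_mig_cost) 0

-- ===== PORT B =====
-- transliteration of Source B's _channel_of: one pass over the channels filling a user→channel dict
-- ('ch in d' / 'd[ch]' ported as Dict.contains / Dict.getD)
def pvChannelOf (placement_dict : List (Int × List Int)) : PySem.Dict Int Int :=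
  (PySem.List.pyRange 0 10 1).foldl (fun chan_of channel_ID =>
    if (PySem.Dict.mk placement_dict).contains channel_ID then
      (((PySem.Dict.mk placement_dict).getD channel_ID []).foldl
        (fun chan_of u => chan_of.insert u channel_ID) chan_of)
    else chan_of) PySem.Dict.empty

def compute_migration_cost_alt (prev_sec_user_placement_dict : List (Int × List Int)) (new_sec_user_placement_dict : List (Int × List Int)) (numb_sec_users : Int) (cost_mig_matrix : List (List Int)) : Int :=
  let prev_of := pvChannelOf prev_sec_user_placement_dict
  let cur_of := pvChannelOf new_sec_user_placement_dict
  (PySem.List.pyRange 0 numb_sec_users 1).foldl (fun total_mig_cost user_ID =>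
    if prev_of.contains user_ID && cur_of.contains user_ID then
      total_mig_cost +
        PySem.List.pyGetD (PySem.List.pyGetD cost_mig_matrix (prev_of.getD user_ID 0) [])
          (cur_of.getD user_ID 0) 0
    else total_mig_cost) 0

-- ===== PRECONDITION & SPEC =====
-- pvMemCh d u ch: user u is in the list the dict d maps channel ch to (first match)
def pvMemCh (d : List (Int × List Int)) (u ch : Int) : Bool :=
  match (PySem.Dict.mk d).get? ch with
  | some lst => decide (u ∈ lst)
  | none => false

-- Pre_ excludes exactly the inputs where the Python A raises IndexError: some user in
-- range(numb_sec_users) whose final (highest matching) previous/current channels index outside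
-- cost_mig_matrix. (Such a user necessarily occurs in one of prev dict's lists, so the
-- quantifier ranges over those lists, not over range(numb_sec_users).)
def Pre_compute_migration_cost (prev_sec_user_placement_dict : List (Int × List Int)) (new_sec_user_placement_dict : List (Int × List Int)) (numb_sec_users : Int) (cost_mig_matrix : List (List Int)) : Prop :=
  ∀ pr ∈ prev_sec_user_placement_dict, ∀ u ∈ pr.2,
    0 ≤ u → u < numb_sec_users →
    ∀ p ∈ PySem.List.pyRange 0 10 1,
    ∀ c ∈ PySem.List.pyRange 0 10 1,
      pvMemCh prev_sec_user_placement_dict u p = true →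
      pvMemCh new_sec_user_placement_dict u c = true →
      (∀ p' ∈ PySem.List.pyRange 0 10 1, p < p' → pvMemCh prev_sec_user_placement_dict u p' = false) →
      (∀ c' ∈ PySem.List.pyRange 0 10 1, c < c' → pvMemCh new_sec_user_placement_dict u c' = false) →
      p < (cost_mig_matrix.length : Int) ∧ c < ((cost_mig_matrix.getD p.toNat []).length : Int)
instance (prev_sec_user_placement_dict : List (Int × List Int)) (new_sec_user_placement_dict : List (Int × List Int)) (numb_sec_users : Int) (cost_mig_matrix : List (List Int)) : Decidable (Pre_compute_migration_cost prev_sec_user_placement_dict new_sec_user_placement_dict numb_sec_users cost_mig_matrix) := by unfold Pre_compute_migration_cost; infer_instance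

def pvWitness_compute_migration_cost : (List (Int × List Int)) × (List (Int × List Int)) × Int × List (List Int) :=
  ([(0, [0])], [(0, [0])], 1, [[5]])

def Spec_compute_migration_cost (prev_sec_user_placement_dict : List (Int × List Int)) (new_sec_user_placement_dict : List (Int × List Int)) (numb_sec_users : Int) (cost_mig_matrix : List (List Int)) (out : Int) : Prop := out = compute_migration_cost_alt prev_sec_user_placement_dict new_sec_user_placement_dict numb_sec_users cost_mig_matrix
instance (prev_sec_user_placement_dict : List (Int × List Int)) (new_sec_user_placement_dict : List (Int × List Int)) (numb_sec_users : Int) (cost_mig_matrix : List (List Int)) (out : Int) : Decidable (Spec_compute_migration_cost prev_sec_user_placement_dict new_sec_user_placement_dict numb_sec_users cost_mig_matrix out) := by unfold Spec_compute_migration_cost; infer_instance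

-- ===== CLAIM (what is proved, stated in full; the proofs are below) =====
def Claim_equal_compute_migration_cost : Prop := ∀ (prev_sec_user_placement_dict : List (Int × List Int)) (new_sec_user_placement_dict : List (Int × List Int)) (numb_sec_users : Int) (cost_mig_matrix : List (List Int)), Dom_compute_migration_cost prev_sec_user_placement_dict new_sec_user_placement_dict numb_sec_users cost_mig_matrix → Pre_compute_migration_cost prev_sec_user_placement_dict new_sec_user_placement_dict numb_sec_users cost_mig_matrix → Spec_compute_migration_cost prev_sec_user_placement_dict new_sec_user_placement_dict numb_sec_users cost_mig_matrix (compute_migration_cost prev_sec_user_placement_dict new_sec_user_placement_dict numb_sec_users cost_mig_matrix)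

-- ===== LEMMAS AND PROOFS =====

-- the "last matching channel in 0..9" option-fold that A's inner loop computes per side
def pvLastChan (d : List (Int × List Int)) (u : Int) : Option Int :=
  (PySem.List.pyRange 0 10 1).foldl (fun o ch =>
    match (PySem.Dict.mk d).get? ch with
    | some lst => if u ∈ lst then some ch else o
    | none => o) none

-- inserting all users of a list at channel ch: lookup afterwards is ch iff the user is in the list
theorem pvInsertFold_get? (lst : List Int) (m : PySem.Dict Int Int) (ch u : Int) :
    (lst.foldl (fun m v => m.insert v ch) m).get? u
      = if u ∈ lst then some ch else m.get? u := by
  induction lst generalizing m with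
  | nil => simp
  | cons v lst ih =>
      simp only [List.foldl_cons, ih, PySem.Dict.get?_insert, List.mem_cons]
      by_cases h1 : u ∈ lst <;> by_cases h2 : u = v <;> simp [h1, h2]

-- lookup in the dict built by B's channel pass = the "last matching channel" fold of A
theorem pvBuild_get? (L : List Int) (d : List (Int × List Int)) (m : PySem.Dict Int Int) (u : Int) :
    ((L.foldl (fun chan_of ch =>
        if (PySem.Dict.mk d).contains ch then
          (((PySem.Dict.mk d).getD ch []).foldl (fun m v => m.insert v ch) chan_of)
        else chan_of) m).get? u)
      = L.foldl (fun (o : Option Int) ch =>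
          match (PySem.Dict.mk d).get? ch with
          | some lst => if u ∈ lst then some ch else o
          | none => o) (m.get? u) := by
  induction L generalizing m with
  | nil => rfl
  | cons ch L ih =>
      simp only [List.foldl_cons, ih]
      congr 1
      rw [PySem.Dict.contains_eq_isSome_get?, PySem.Dict.getD_eq_get?_getD]
      cases h : (PySem.Dict.mk d).get? ch with
      | none => rfl
      | some lst => simp [pvInsertFold_get? lst m ch u]

theorem pvChannelOf_get? (d : List (Int × List Int)) (u : Int) :
    (pvChannelOf d).get? u = pvLastChan d u := by
  unfold pvChannelOf pvLastChan
  rw [pvBuild_get?]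
  rfl

-- A's interleaved pair fold splits into the two independent single-side folds
theorem pvPairFold_split (prev new : List (Int × List Int)) (u : Int) (L : List Int)
    (pc : Option Int × Option Int) :
    (L.foldl (fun (pc : Option Int × Option Int) ch =>
        let pc1 :=
          match (PySem.Dict.mk prev).get? ch with
          | some lst => if u ∈ lst then (some ch, pc.2) else pc
          | none => pc
        match (PySem.Dict.mk new).get? ch with
        | some lst => if u ∈ lst then (pc1.1, some ch) else pc1
        | none => pc1) pc)
      = (L.foldl (fun (o : Option Int) ch =>
            match (PySem.Dict.mk prev).get? ch with
            | some lst => if u ∈ lst then some ch else o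
            | none => o) pc.1,
         L.foldl (fun (o : Option Int) ch =>
            match (PySem.Dict.mk new).get? ch with
            | some lst => if u ∈ lst then some ch else o
            | none => o) pc.2) := by
  induction L generalizing pc with
  | nil => rfl
  | cons ch L ih =>
      simp only [List.foldl_cons, ih]
      congr 1 <;>
      · cases h1 : (PySem.Dict.mk prev).get? ch <;>
        cases h2 : (PySem.Dict.mk new).get? ch <;>
        simp <;> split_ifs <;> rfl

-- A's inner pair fold, started at (none, none), is the pair of pvLastChan folds
theorem pvPairFold_lastChan (prev new : List (Int × List Int)) (u : Int) :
    ((PySem.List.pyRange 0 10 1).foldl (fun (pc : Option Int × Option Int) ch =>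
        let pc1 :=
          match (PySem.Dict.mk prev).get? ch with
          | some lst => if u ∈ lst then (some ch, pc.2) else pc
          | none => pc
        match (PySem.Dict.mk new).get? ch with
        | some lst => if u ∈ lst then (pc1.1, some ch) else pc1
        | none => pc1) (none, none))
      = (pvLastChan prev u, pvLastChan new u) := by
  rw [pvPairFold_split]
  rfl

-- the per-user bodies of A and B agree
theorem pvStep (prev new : List (Int × List Int)) (u total : Int) (cost : List (List Int)) :
    (match pvLastChan prev u, pvLastChan new u with
     | some p, some c => total + PySem.List.pyGetD (PySem.List.pyGetD cost p []) c 0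
     | _, _ => total)
      = (if (pvChannelOf prev).contains u && (pvChannelOf new).contains u then
           total + PySem.List.pyGetD
             (PySem.List.pyGetD cost ((pvChannelOf prev).getD u 0) [])
             ((pvChannelOf new).getD u 0) 0
         else total) := by
  rw [PySem.Dict.contains_eq_isSome_get?, PySem.Dict.contains_eq_isSome_get?,
      PySem.Dict.getD_eq_get?_getD, PySem.Dict.getD_eq_get?_getD,
      pvChannelOf_get?, pvChannelOf_get?]
  cases pvLastChan prev u <;> cases pvLastChan new u <;> rfl

theorem pvEqAB (prev new : List (Int × List Int)) (numb : Int) (cost : List (List Int)) :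
    compute_migration_cost prev new numb cost = compute_migration_cost_alt prev new numb cost := by
  unfold compute_migration_cost compute_migration_cost_alt
  apply PySem.List.foldl_congr_mem
  intro total u _
  rw [pvPairFold_lastChan prev new u]
  exact pvStep prev new u total cost

-- ===== VERDICT (by name: the statement is the Claim_ definition above) =====
theorem compute_migration_cost_spec : Claim_equal_compute_migration_cost := by
  intro prev new numb cost _ _
  exact pvEqAB prev new numb cost
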